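-- pv_equiv track=rewrite | github.com/hnpl/project-euler | 6th_100/problem539.py | evaluate_P_range_1_pow_2_n
-- ===== SOURCE A (Python) =====
-- def evaluate_P_range_1_pow_2_n(n): # begin = 1, end = 2**n-1
--     sum = 5
--
--     s = 0
--     prev_s = 4
--
--     for k in range(3, n+1):
--         s = 4 * (2**(2*k-4) + 2**(2*k-5) - 2**(k-3)) + 2**k - 4*prev_s
--         sum += s
--         prev_s = s
--
--     return sum
-- ===== SOURCE B (Python) =====
-- def evaluate_P_range_1_pow_2_n(n):
--     if n < 3:
--         return 5
--     return 1 + 4 ** (n - 1) + (40 * (2 ** (n + 1) - 8) - (-4) ** (n + 1) - 64) // 240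
-- ===== Notes on version B (the rewrite author's own statement) =====
-- stated objective: faster
-- what changed: B replaces A's loop over the recurrence s_k = c_k - 4*s_{k-1} by the solved closed form: one power of 4, one geometric-sum expression and an exact integer division by 240.
import Mathlib
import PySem

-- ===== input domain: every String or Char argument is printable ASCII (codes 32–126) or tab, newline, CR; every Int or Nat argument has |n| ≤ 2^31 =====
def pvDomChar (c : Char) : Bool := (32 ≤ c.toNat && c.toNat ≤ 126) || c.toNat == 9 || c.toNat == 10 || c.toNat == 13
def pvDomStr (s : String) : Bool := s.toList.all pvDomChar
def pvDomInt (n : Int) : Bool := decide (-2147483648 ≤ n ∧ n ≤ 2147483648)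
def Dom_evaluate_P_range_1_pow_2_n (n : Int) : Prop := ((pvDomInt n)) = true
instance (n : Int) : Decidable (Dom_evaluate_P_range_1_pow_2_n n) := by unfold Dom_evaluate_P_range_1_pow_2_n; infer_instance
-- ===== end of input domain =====

-- B replaces A's loop over the recurrence by its solved closed form (geometric terms
-- plus one exact integer division), i.e. a genuinely different algorithm.

-- ===== PORT A =====
-- loop state is (sum, prev_s); A's initial `s = 0` is dead (overwritten before any use)
def evaluate_P_range_1_pow_2_n (n : Int) : Int :=
  ((PySem.List.pyRange 3 (n + 1) 1).foldl
    (fun (st : Int × Int) k =>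
      let s := 4 * ((2 : Int) ^ (2 * k - 4).toNat + 2 ^ (2 * k - 5).toNat - 2 ^ (k - 3).toNat)
                 + 2 ^ k.toNat - 4 * st.2
      (st.1 + s, s)) (5, 4)).1

-- ===== PORT B =====
def evaluate_P_range_1_pow_2_n_alt (n : Int) : Int :=
  if n < 3 then 5
  else 1 + (4 : Int) ^ (n - 1).toNat
         + PySem.Int.floordiv
             (40 * ((2 : Int) ^ (n + 1).toNat - 8) - (-4 : Int) ^ (n + 1).toNat - 64) 240

-- ===== PRECONDITION & SPEC =====
def Spec_evaluate_P_range_1_pow_2_n (n : Int) (out : Int) : Prop := out = evaluate_P_range_1_pow_2_n_alt n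
instance (n : Int) (out : Int) : Decidable (Spec_evaluate_P_range_1_pow_2_n n out) := by unfold Spec_evaluate_P_range_1_pow_2_n; infer_instance

-- ===== CLAIM (what is proved, stated in full; the proofs are below) =====
def Claim_equal_evaluate_P_range_1_pow_2_n : Prop := ∀ (n : Int), Dom_evaluate_P_range_1_pow_2_n n → Spec_evaluate_P_range_1_pow_2_n n (evaluate_P_range_1_pow_2_n n)

-- ===== LEMMAS AND PROOFS =====

-- A's loop body, named so the invariant can speak about the fold
def pvStepA (st : Int × Int) (k : Int) : Int × Int :=
  let s := 4 * ((2 : Int) ^ (2 * k - 4).toNat + 2 ^ (2 * k - 5).toNat - 2 ^ (k - 3).toNat)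
             + 2 ^ k.toNat - 4 * st.2
  (st.1 + s, s)

-- Invariant after folding k = 3 .. m+3 (x = 2^m, y = 4^m, z = (-4)^m):
--   3 * prev_s = 36y + 4x - 4z   and   240 * sum = 3840y + 640x - 144 - 256z
theorem pv_loop_inv (m : Nat) :
    3 * ((PySem.List.pyRange 3 ((m : Int) + 4) 1).foldl pvStepA (5, 4)).2
      = 36 * 4 ^ m + 4 * 2 ^ m - 4 * (-4 : Int) ^ m ∧
    240 * ((PySem.List.pyRange 3 ((m : Int) + 4) 1).foldl pvStepA (5, 4)).1
      = 3840 * 4 ^ m + 640 * 2 ^ m - 144 - 256 * (-4 : Int) ^ m := by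
  induction m with
  | zero => decide
  | succ m ih =>
    obtain ⟨ih1, ih2⟩ := ih
    have hcast : ((m + 1 : Nat) : Int) + 4 = ((m : Int) + 4) + 1 := by push_cast; ring
    rw [hcast, PySem.List.pyRange_one_succ_right (by omega), List.foldl_append]
    have e1 : (2 * ((m : Int) + 4) - 4).toNat = 2 * m + 4 := by omega
    have e2 : (2 * ((m : Int) + 4) - 5).toNat = 2 * m + 3 := by omega
    have e3 : (((m : Int) + 4) - 3).toNat = m + 1 := by omega
    have e4 : ((m : Int) + 4).toNat = m + 4 := by omega
    simp only [List.foldl_cons, List.foldl_nil, pvStepA, e1, e2, e3, e4]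
    have p1 : (2 : Int) ^ (2 * m + 4) = 16 * 4 ^ m := by rw [pow_add, pow_mul]; ring
    have p2 : (2 : Int) ^ (2 * m + 3) = 8 * 4 ^ m := by rw [pow_add, pow_mul]; ring
    have p3 : (2 : Int) ^ (m + 4) = 16 * 2 ^ m := by rw [pow_add]; ring
    have p4 : (4 : Int) ^ (m + 1) = 4 * 4 ^ m := by rw [pow_succ]; ring
    have p5 : (2 : Int) ^ (m + 1) = 2 * 2 ^ m := by rw [pow_succ]; ring
    have p6 : ((-4) : Int) ^ (m + 1) = -4 * (-4) ^ m := by rw [pow_succ]; ring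
    rw [p1, p2, p3, p4, p5, p6]
    constructor <;> linarith [ih1, ih2]

-- ===== VERDICT (by name: the statement is the Claim_ definition above) =====
theorem evaluate_P_range_1_pow_2_n_spec : Claim_equal_evaluate_P_range_1_pow_2_n := by
  intro n _
  unfold Spec_evaluate_P_range_1_pow_2_n
  by_cases h : n < 3
  · unfold evaluate_P_range_1_pow_2_n evaluate_P_range_1_pow_2_n_alt
    rw [PySem.List.pyRange_one_eq_nil (by omega), if_pos h]
    rfl
  · set m := (n - 3).toNat with hmdef
    obtain ⟨-, h2⟩ := pv_loop_inv m
    have hA : evaluate_P_range_1_pow_2_n n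
        = ((PySem.List.pyRange 3 ((m : Int) + 4) 1).foldl pvStepA (5, 4)).1 := by
      have h4 : n + 1 = (m : Int) + 4 := by omega
      unfold evaluate_P_range_1_pow_2_n
      rw [h4]; rfl
    have hB : evaluate_P_range_1_pow_2_n_alt n
        = 1 + (4 : Int) ^ (m + 2)
            + PySem.Int.floordiv
                (40 * ((2 : Int) ^ (m + 4) - 8) - (-4 : Int) ^ (m + 4) - 64) 240 := by
      unfold evaluate_P_range_1_pow_2_n_alt
      rw [if_neg (by omega)]
      have e1 : (n - 1).toNat = m + 2 := by omega
      have e2 : (n + 1).toNat = m + 4 := by omega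
      rw [e1, e2]
    have pA : (4 : Int) ^ (m + 2) = 16 * 4 ^ m := by rw [pow_add]; ring
    have pB : (2 : Int) ^ (m + 4) = 16 * 2 ^ m := by rw [pow_add]; ring
    have pC : ((-4) : Int) ^ (m + 4) = 256 * (-4 : Int) ^ m := by rw [pow_add]; ring
    have hT : 40 * ((2 : Int) ^ (m + 4) - 8) - (-4 : Int) ^ (m + 4) - 64
        = 240 * (evaluate_P_range_1_pow_2_n n - 1 - 16 * (4 : Int) ^ m) := by
      rw [pB, pC, hA]; linarith [h2]
    rw [hB, hT, PySem.Int.floordiv_eq_ediv_of_pos (by norm_num),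
        Int.mul_ediv_cancel_left _ (by norm_num), hA, pA]
    ring
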